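-- pv_equiv track=rewrite | github.com/constantinoval/dearpygui | libs/lsmesh_lib.py | searchKeywords
-- ===== SOURCE A (Python) =====
-- def searchKeywords(data):
--     comments = []
--     for i, l in enumerate(data):
--         if l.startswith('$'):
--             comments.append(i)
--     comments.reverse()
--     for i in comments:
--         data.pop(i)
--     keywords = []
--     indexes = []
--     for i, l in enumerate(data):
--         if l.startswith('*'):
--             keywords.append(l.upper()[:-1])
--             indexes.append(i)
--     return keywords, indexes
-- ===== SOURCE B (Python) =====
-- def searchKeywords(data):
--     new_data = []
--     keywords = []
--     indexes = []
--     for l in data: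
--         if l.startswith('$'):
--             continue
--         new_data.append(l)
--         if l.startswith('*'):
--             keywords.append(l.upper()[:-1])
--             indexes.append(len(new_data) - 1)
--     data[:] = new_data
--     return keywords, indexes
-- ===== Notes on version B (the rewrite author's own statement) =====
-- stated objective: simpler
-- what changed: Replaces A's three passes (collect comment indices, reverse and pop them out in place, re-scan the shrunk list with enumerate) by one forward pass that builds the filtered list, keywords and running indexes together, then assigns data[:] to reproduce the in-place removal.
import Mathlib
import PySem

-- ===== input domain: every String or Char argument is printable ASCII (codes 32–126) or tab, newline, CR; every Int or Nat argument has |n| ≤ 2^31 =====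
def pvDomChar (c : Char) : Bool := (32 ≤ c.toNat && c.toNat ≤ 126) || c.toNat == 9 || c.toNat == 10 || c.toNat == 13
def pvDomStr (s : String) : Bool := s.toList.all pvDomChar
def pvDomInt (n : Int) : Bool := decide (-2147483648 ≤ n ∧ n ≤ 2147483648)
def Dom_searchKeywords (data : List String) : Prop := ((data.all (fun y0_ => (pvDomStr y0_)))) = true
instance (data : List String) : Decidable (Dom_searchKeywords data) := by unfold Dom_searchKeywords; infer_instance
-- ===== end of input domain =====

-- B replaces A's three passes (collect comment indices, reverse-and-pop in place, re-scan)
-- by one forward pass maintaining the filtered list and a running index (simpler);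
-- both Pythons mutate `data` identically (A pops, B assigns data[:]); the claim is about the return value.


-- ===== PORT A =====
-- data.pop(i): pop? never returns none on the indices A uses (they are valid); keep d on none
def popAt {α : Type} (d : List α) (i : Int) : List α :=
  match PySem.List.pop? d i with
  | some r => r.2
  | none => d

def searchKeywords (data : List String) : List String × List Int :=
  let comments : List Int :=
    (PySem.List.enumerate data).foldl
      (fun acc p => if PySem.Str.startswith p.2 "$" then acc ++ [p.1] else acc) []
  let comments := comments.reverse
  let data := comments.foldl (fun d i => popAt d i) data
  (PySem.List.enumerate data).foldl
    (fun acc p =>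
      if PySem.Str.startswith p.2 "*" then
        (acc.1 ++ [PySem.Str.slice (PySem.Str.upper p.2) none (some (-1))], acc.2 ++ [p.1])
      else acc) ([], [])

-- ===== PORT B =====
def searchKeywords_alt (data : List String) : List String × List Int :=
  let st : List String × List String × List Int :=
    data.foldl
      (fun st l =>
        if PySem.Str.startswith l "$" then st
        else
          let nd := st.1 ++ [l]
          if PySem.Str.startswith l "*" then
            (nd, st.2.1 ++ [PySem.Str.slice (PySem.Str.upper l) none (some (-1))],
                 st.2.2 ++ [((nd.length - 1 : Nat) : Int)])
          else (nd, st.2.1, st.2.2))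
      ([], [], [])
  (st.2.1, st.2.2)

-- ===== PRECONDITION & SPEC =====
def Spec_searchKeywords (data : List String) (out : List String × List Int) : Prop := out = searchKeywords_alt data
instance (data : List String) (out : List String × List Int) : Decidable (Spec_searchKeywords data out) := by unfold Spec_searchKeywords; infer_instance

-- ===== CLAIM (what is proved, stated in full; the proofs are below) =====
def Claim_equal_searchKeywords : Prop := ∀ (data : List String), Dom_searchKeywords data → Spec_searchKeywords data (searchKeywords data)

-- ===== LEMMAS AND PROOFS =====

-- abbreviations for the three tests/transform both programs use
def pvP (l : String) : Bool := PySem.Str.startswith l "$"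
def pvQ (l : String) : Bool := PySem.Str.startswith l "*"
def pvU (l : String) : String := PySem.Str.slice (PySem.Str.upper l) none (some (-1))

-- the filtered list (comment lines removed)
def pvF (data : List String) : List String := data.filter (fun l => !pvP l)

-- comment indices (as naturals), keyword strings, keyword indices of a list
def comN : List String → List Nat
  | [] => []
  | x :: xs => (if pvP x then [0] else []) ++ (comN xs).map (· + 1)

def kwK : List String → List String
  | [] => []
  | x :: xs => (if pvQ x then [pvU x] else []) ++ kwK xs

def kwI : List String → List Nat
  | [] => []
  | x :: xs => (if pvQ x then [0] else []) ++ (kwI xs).map (· + 1)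

-- A's first pass computes comN (shifted by the enumerate start)
theorem comments_eq (data : List String) : ∀ (s : Int) (acc : List Int),
    (PySem.List.enumerate data s).foldl
      (fun acc p => if PySem.Str.startswith p.2 "$" then acc ++ [p.1] else acc) acc
      = acc ++ (comN data).map (fun (k : Nat) => s + (k : Int)) := by
  induction data with
  | nil => intro s acc; simp [PySem.List.enumerate, comN]
  | cons x xs ih =>
    intro s acc
    rw [PySem.List.enumerate_cons, List.foldl_cons]
    have hm : (comN xs).map ((fun (k : Nat) => s + (k : Int)) ∘ (· + 1))
        = (comN xs).map (fun (k : Nat) => (s + 1) + (k : Int)) := by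
      apply List.map_congr_left; intro a _; simp only [Function.comp_apply]; push_cast; ring
    have hs : PySem.Str.startswith x "$" = pvP x := rfl
    rw [comN, hs]
    by_cases h : pvP x <;>
      simp only [h, if_true, Bool.false_eq_true, if_false] <;>
      rw [ih, List.map_append, List.map_map, hm] <;>
      simp

theorem popAt_cons_succ {α : Type} (x : α) (xs : List α) (k : Nat) (h : k < xs.length) :
    popAt (x :: xs) ((k + 1 : Nat) : Int) = x :: popAt xs (k : Int) := by
  rw [popAt, popAt, PySem.List.pop?_natCast xs k h,
      PySem.List.pop?_natCast (x :: xs) (k+1) (by simpa using Nat.succ_lt_succ h)]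
  simp
theorem length_popAt {α : Type} (xs : List α) (k : Nat) (h : k < xs.length) :
    (popAt xs (k : Int)).length = xs.length - 1 := by
  rw [popAt, PySem.List.pop?_natCast xs k h]
  simp [List.length_eraseIdx, h]

theorem comN_lt (data : List String) : ∀ k ∈ comN data, k < data.length := by
  induction data with
  | nil => simp [comN]
  | cons x xs ih =>
    intro k hk
    rw [comN] at hk
    rcases List.mem_append.1 hk with h | h
    · split at h <;> simp_all
    · obtain ⟨a, ha, rfl⟩ := List.mem_map.1 h
      have := ih a ha; simp; omega

theorem comN_pairwise (data : List String) : (comN data).Pairwise (· < ·) := by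
  induction data with
  | nil => simp [comN]
  | cons x xs ih =>
    rw [comN]
    refine List.pairwise_append.2 ⟨?_, ?_, ?_⟩
    · split <;> simp
    · exact (List.pairwise_map.2 (ih.imp (by omega)))
    · intro a ha b hb
      obtain ⟨c, _, rfl⟩ := List.mem_map.1 hb
      split at ha <;> simp_all

theorem foldl_popAt_shift {α : Type} (l : List Nat) : ∀ (x : α) (xs : List α),
    (∀ k ∈ l, k < xs.length) → l.Pairwise (· > ·) →
    (l.map (fun k => ((k + 1 : Nat) : Int))).foldl popAt (x :: xs)
      = x :: (l.map (fun (k : Nat) => (k : Int))).foldl popAt xs := by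
  induction l with
  | nil => intro x xs _ _; simp
  | cons k0 rest ih =>
    intro x xs hlt hpw
    have hk0 : k0 < xs.length := hlt k0 (by simp)
    simp only [List.map_cons, List.foldl_cons]
    rw [popAt_cons_succ x xs k0 hk0]
    apply ih
    · intro k hk
      have h1 : k < k0 := (List.pairwise_cons.1 hpw).1 k hk
      rw [length_popAt xs k0 hk0]; omega
    · exact (List.pairwise_cons.1 hpw).2

theorem pop_loop_eq (data : List String) :
    (((comN data).map (fun (k : Nat) => (k : Int))).reverse).foldl popAt data = pvF data := by
  induction data with
  | nil => simp [comN, pvF]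
  | cons x xs ih =>
    rw [comN, pvF, List.filter_cons]
    have hrev : (((if pvP x then [0] else []) ++ (comN xs).map (· + 1)).map
        (fun (k : Nat) => (k : Int))).reverse
        = ((comN xs).reverse.map (fun k => ((k + 1 : Nat) : Int)))
          ++ ((if pvP x then [0] else []).map (fun (k : Nat) => (k : Int))) := by
      by_cases h : pvP x <;> simp [h, List.map_map, Function.comp_def]
    rw [hrev, List.foldl_append]
    have hshift := foldl_popAt_shift (comN xs).reverse x xs
      (by intro k hk; exact comN_lt xs k (List.mem_reverse.1 hk))
      (List.pairwise_reverse.2 ((comN_pairwise xs).imp (by omega)))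
    rw [hshift, List.map_reverse, ih]
    by_cases h : pvP x
    · simp only [h, if_true]
      simp [popAt, PySem.List.pop?_zero_cons, pvF]
    · simp [h, pvF]

theorem pass2_eq (g : List String) : ∀ (s : Int) (acc : List String × List Int),
    (PySem.List.enumerate g s).foldl
      (fun acc p =>
        if PySem.Str.startswith p.2 "*" then
          (acc.1 ++ [PySem.Str.slice (PySem.Str.upper p.2) none (some (-1))], acc.2 ++ [p.1])
        else acc) acc
      = (acc.1 ++ kwK g, acc.2 ++ (kwI g).map (fun (k : Nat) => s + (k : Int))) := by
  induction g with
  | nil => intro s acc; simp [PySem.List.enumerate, kwK, kwI]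
  | cons x xs ih =>
    intro s acc
    rw [PySem.List.enumerate_cons, List.foldl_cons]
    have hm : (kwI xs).map ((fun (k : Nat) => s + (k : Int)) ∘ (· + 1))
        = (kwI xs).map (fun (k : Nat) => (s + 1) + (k : Int)) := by
      apply List.map_congr_left; intro a _; simp only [Function.comp_apply]; push_cast; ring
    have hs : PySem.Str.startswith x "*" = pvQ x := rfl
    have hu : PySem.Str.slice (PySem.Str.upper x) none (some (-1)) = pvU x := rfl
    rw [kwK, kwI, hs, hu]
    by_cases h : pvQ x <;>
      simp only [h, if_true, Bool.false_eq_true, if_false] <;>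
      rw [ih, List.map_append, List.map_map, hm] <;>
      simp

theorem bfold_eq (data : List String) : ∀ (nd kws : List String) (idxs : List Int),
    data.foldl
      (fun st l =>
        if PySem.Str.startswith l "$" then st
        else
          let nd := st.1 ++ [l]
          if PySem.Str.startswith l "*" then
            (nd, st.2.1 ++ [PySem.Str.slice (PySem.Str.upper l) none (some (-1))],
                 st.2.2 ++ [((nd.length - 1 : Nat) : Int)])
          else (nd, st.2.1, st.2.2))
      (nd, kws, idxs)
      = (nd ++ pvF data, kws ++ kwK (pvF data),
         idxs ++ (kwI (pvF data)).map (fun (k : Nat) => ((nd.length + k : Nat) : Int))) := by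
  induction data with
  | nil => intro nd kws idxs; simp [pvF, kwK, kwI]
  | cons x xs ih =>
    intro nd kws idxs
    rw [List.foldl_cons]
    have hsP : PySem.Str.startswith x "$" = pvP x := rfl
    have hsQ : PySem.Str.startswith x "*" = pvQ x := rfl
    have hu : PySem.Str.slice (PySem.Str.upper x) none (some (-1)) = pvU x := rfl
    have hFc : pvF (x :: xs) = (if pvP x then [] else [x]) ++ pvF xs := by
      rw [pvF, List.filter_cons]; by_cases h : pvP x <;> simp [h, pvF]
    simp only [hsP, hsQ, hu]
    by_cases h : pvP x
    · simp only [h, if_true, hFc, List.nil_append]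
      exact ih nd kws idxs
    · have hm : ∀ L : List Nat, L.map ((fun (k : Nat) => ((nd.length + k : Nat) : Int)) ∘ (· + 1))
          = L.map (fun (k : Nat) => (((nd ++ [x]).length + k : Nat) : Int)) := by
        intro L; apply List.map_congr_left; intro a _; simp; omega
      by_cases hq : pvQ x
      · simp only [h, hq, Bool.false_eq_true, if_false, hFc, List.singleton_append]
        rw [ih]
        simp only [kwK, kwI, hq, if_true,
          List.map_append, List.map_map, hm (kwI (pvF xs))]
        simp
      · simp only [h, hq, Bool.false_eq_true, if_false, hFc, List.singleton_append]
        rw [ih]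
        simp only [kwK, kwI, hq, Bool.false_eq_true, if_false,
          List.map_append, List.map_map, hm (kwI (pvF xs))]
        simp

-- ===== VERDICT (by name: the statement is the Claim_ definition above) =====
theorem searchKeywords_spec : Claim_equal_searchKeywords := by
  intro data _
  unfold Spec_searchKeywords
  show searchKeywords data = searchKeywords_alt data
  rw [searchKeywords, searchKeywords_alt]
  rw [comments_eq data 0 [], bfold_eq data [] [] []]
  have h0 : (List.map (fun (k : Nat) => (0 : Int) + (k : Int)) (comN data)) =
      (comN data).map (fun (k : Nat) => (k : Int)) := by
    apply List.map_congr_left; intro a _; ring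
  rw [List.nil_append, h0]
  have hpop : List.foldl (fun d i => popAt d i) data
      ((comN data).map (fun (k : Nat) => (k : Int))).reverse = pvF data := pop_loop_eq data
  rw [hpop, pass2_eq (pvF data) 0 ([], [])]
  simp
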